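-- pv_equiv track=rewrite | github.com/Neotys-Connect/neoload-compose | neoload_compose/commands/import.py | item_matches_filter
-- ===== SOURCE A (Python) =====
-- def item_matches_filter(item, filter):
--     if len(filter) > 0:
--         for key in filter: # filters may be more than one value
--             matches = filter[key]
--             ret = False # assume not a match unless at least one value matches
--             for match in matches:
--                 if key in item: # some elements don't have the filter key
--                     val = item[key]
--                     if val == match:
--                         ret = True
--         return ret
--     else:
--         return True # no filter means everything
-- ===== SOURCE B (Python) =====
-- def item_matches_filter(item, filter):
--     return all(key in item and item[key] in matches
--                for key, matches in filter.items())
-- ===== Notes on version B (the rewrite author's own statement) =====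
-- stated objective: simpler
-- what changed: Replaces the nested loops with a reassigned accumulator by a single short-circuiting all() over the filter items, requiring every filter key to match; this also fixes A's per-key accumulator reset, under which only the last filter key decided the result.
-- intended difference: When the filter has at least two keys, the last key matches the item but some earlier key does not, A returns True (its accumulator is reset each key, so only the last key counts) while B returns False, which is the intended conjunction of all filter criteria. — e.g. on item_matches_filter([("a", "1")], [("b", ["2"]), ("a", ["1"])]): A returns true, B returns false
import Mathlib
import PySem

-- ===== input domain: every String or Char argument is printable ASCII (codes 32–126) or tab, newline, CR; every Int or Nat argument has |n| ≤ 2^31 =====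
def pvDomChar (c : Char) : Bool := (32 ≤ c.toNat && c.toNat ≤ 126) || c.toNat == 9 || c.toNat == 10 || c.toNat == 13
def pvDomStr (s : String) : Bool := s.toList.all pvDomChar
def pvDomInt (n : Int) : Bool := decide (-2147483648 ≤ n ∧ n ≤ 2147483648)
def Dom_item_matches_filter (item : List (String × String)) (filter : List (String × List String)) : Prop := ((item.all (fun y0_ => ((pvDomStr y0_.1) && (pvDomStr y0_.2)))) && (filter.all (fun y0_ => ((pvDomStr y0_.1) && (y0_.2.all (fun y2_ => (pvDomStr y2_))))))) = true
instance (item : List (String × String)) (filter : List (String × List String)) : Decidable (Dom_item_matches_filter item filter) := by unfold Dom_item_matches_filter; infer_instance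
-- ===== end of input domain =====

-- B checks every filter key with a single all() instead of A's nested loops with a
-- reassigned accumulator (objective: simpler); it also fixes A's per-key accumulator
-- reset, under which only the last filter key decided the result (see D_ below).

-- ===== PORT A =====
-- literal transliteration: outer loop over the dict's keys carrying ret, inner loop over
-- filter[key]; filter[key] always succeeds (key comes from the dict), item[key] is guarded
-- by 'key in item', so the getD defaults are never reached.
def item_matches_filter (item : List (String × String)) (filter : List (String × List String)) : Bool :=
  let f := PySem.Dict.ofList filter
  let it := PySem.Dict.ofList item
  if f.size > 0 then
    f.keys.foldl (fun _ret key =>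
      let ms := f.getD key []
      ms.foldl (fun ret m =>
        if it.contains key then
          let val := it.getD key ""
          if val == m then true else ret
        else ret) false) false
  else
    true

-- ===== PORT B =====
-- all(key in item and item[key] in matches for key, matches in filter.items())
def item_matches_filter_alt (item : List (String × String)) (filter : List (String × List String)) : Bool :=
  let it := PySem.Dict.ofList item
  (PySem.Dict.ofList filter).items.all (fun p =>
    it.contains p.1 && p.2.contains (it.getD p.1 ""))

-- ===== PRECONDITION & SPEC =====
-- key k of the filter dict is satisfied by the item dict
def pvKeyOK (it : PySem.Dict String String) (f : PySem.Dict String (List String)) (k : String) : Bool :=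
  it.contains k && (f.getD k []).contains (it.getD k "")

-- When the filter has ≥2 keys, the last key matches the item but some earlier key does not,
-- A returns True (its accumulator is reset each key, so only the last key counts) while B
-- returns False, the intended conjunction of all filter criteria.
def D_item_matches_filter (item : List (String × String)) (filter : List (String × List String)) : Prop :=
  (let f := PySem.Dict.ofList filter
   let it := PySem.Dict.ofList item
   match f.keys.reverse with
   | [] => false
   | k :: rest => pvKeyOK it f k && rest.any (fun k' => ! pvKeyOK it f k')) = true
instance (item : List (String × String)) (filter : List (String × List String)) : Decidable (D_item_matches_filter item filter) := by unfold D_item_matches_filter; infer_instance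

def Spec_item_matches_filter (item : List (String × String)) (filter : List (String × List String)) (out : Bool) : Prop := ¬ D_item_matches_filter item filter → out = item_matches_filter_alt item filter
instance (item : List (String × String)) (filter : List (String × List String)) (out : Bool) : Decidable (Spec_item_matches_filter item filter out) := by unfold Spec_item_matches_filter; infer_instance

def pvDiffWitness_item_matches_filter : (List (String × String)) × (List (String × List String)) :=
  ([("a", "1")], [("b", ["2"]), ("a", ["1"])])
def pvDiffWitnessOut_item_matches_filter : Bool × Bool := (true, false)

-- ===== CLAIM (what is proved, stated in full; the proofs are below) =====
def Claim_unchanged_item_matches_filter : Prop := ∀ (item : List (String × String)) (filter : List (String × List String)), Dom_item_matches_filter item filter → Spec_item_matches_filter item filter (item_matches_filter item filter)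
def Claim_changed_item_matches_filter : Prop := Dom_item_matches_filter (pvDiffWitness_item_matches_filter.1) (pvDiffWitness_item_matches_filter.2) ∧ D_item_matches_filter (pvDiffWitness_item_matches_filter.1) (pvDiffWitness_item_matches_filter.2) ∧ item_matches_filter (pvDiffWitness_item_matches_filter.1) (pvDiffWitness_item_matches_filter.2) = pvDiffWitnessOut_item_matches_filter.1 ∧ item_matches_filter_alt (pvDiffWitness_item_matches_filter.1) (pvDiffWitness_item_matches_filter.2) = pvDiffWitnessOut_item_matches_filter.2 ∧ pvDiffWitnessOut_item_matches_filter.1 ≠ pvDiffWitnessOut_item_matches_filter.2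
def Claim_exact_item_matches_filter : Prop := ∀ (item : List (String × String)) (filter : List (String × List String)), Dom_item_matches_filter item filter → D_item_matches_filter item filter → item_matches_filter item filter ≠ item_matches_filter_alt item filter

-- ===== LEMMAS AND PROOFS =====

-- A fold whose step ignores the accumulator returns the step applied to the last element.
theorem foldl_ignore_acc {α β : Type} (h : α → β) (l : List α) (init : β) :
    l.foldl (fun _ x => h x) init = (match l.getLast? with | none => init | some x => h x) := by
  induction l generalizing init with
  | nil => rfl
  | cons x xs ih =>
    simp only [List.foldl_cons, ih (h x)]
    cases hx : xs.getLast? with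
    | none => simp [List.getLast?_eq_none_iff.mp hx]
    | some y =>
      rcases xs with _ | ⟨z, zs⟩
      · simp at hx
      · simp [List.getLast?_cons_cons, hx]

-- A's inner loop over one key's match list computes pvKeyOK for that key.
theorem inner_loop_eq_pvKeyOK (it : PySem.Dict String String)
    (f : PySem.Dict String (List String)) (key : String) :
    (f.getD key []).foldl (fun ret m =>
        if it.contains key then
          if it.getD key "" == m then true else ret
        else ret) false = pvKeyOK it f key := by
  unfold pvKeyOK
  by_cases hc : it.contains key
  · simp only [hc, if_true, Bool.true_and]
    generalize f.getD key [] = ms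
    induction ms with
    | nil => simp
    | cons m rest ih =>
      simp only [List.foldl_cons, List.contains_cons]
      by_cases hm : it.getD key "" == m
      · simp only [hm, if_true, Bool.true_or]
        generalize (false : Bool) = b  -- fold from true: show it stays true
        clear ih
        have : ∀ l : List String, l.foldl (fun ret m =>
            if it.getD key "" == m then true else ret) true = true := by
          intro l
          induction l with
          | nil => rfl
          | cons x xs ih2 => simp only [List.foldl_cons]; split <;> exact ih2
        exact this rest
      · simp only [hm]
        simpa using ih
  · have hcb : it.contains key = false := by simpa using hc
    simp only [hcb, Bool.false_and]
    generalize f.getD key [] = ms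
    induction ms with
    | nil => rfl
    | cons m rest ih => exact ih

-- A returns the status of the last filter key (true for an empty filter).
theorem portA_char (item : List (String × String)) (filter : List (String × List String)) :
    item_matches_filter item filter =
      (match (PySem.Dict.ofList filter).keys.reverse with
       | [] => true
       | k :: _ => pvKeyOK (PySem.Dict.ofList item) (PySem.Dict.ofList filter) k) := by
  unfold item_matches_filter
  set f := PySem.Dict.ofList filter
  set it := PySem.Dict.ofList item
  by_cases hsz : f.size > 0
  · have hkeys : f.keys ≠ [] := by
      intro h
      have : f.size = 0 := by simpa [PySem.Dict.keys, PySem.Dict.size] using congrArg List.length h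
      omega
    simp only [hsz, if_true]
    have := foldl_ignore_acc (fun key =>
      (f.getD key []).foldl (fun ret m =>
        if it.contains key then
          if it.getD key "" == m then true else ret
        else ret) false) f.keys false
    rw [this]
    cases hr : f.keys.reverse with
    | nil => exact absurd (by simpa using congrArg List.reverse hr) hkeys
    | cons k rest =>
      have hlast : f.keys.getLast? = some k := by
        rw [← List.head?_reverse, hr]; rfl
      simp only [hlast]
      exact inner_loop_eq_pvKeyOK it f k
  · have : f.keys.reverse = [] := by
      have : f.keys = [] := by
        have : f.keys.length = 0 := by
          simpa [PySem.Dict.size, PySem.Dict.keys] using Nat.eq_zero_of_not_pos hsz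
        exact List.eq_nil_of_length_eq_zero this
      simp [this]
    simp [hsz, this]

-- B checks pvKeyOK for every filter key.
theorem portB_char (item : List (String × String)) (filter : List (String × List String)) :
    item_matches_filter_alt item filter =
      (PySem.Dict.ofList filter).keys.all
        (pvKeyOK (PySem.Dict.ofList item) (PySem.Dict.ofList filter)) := by
  unfold item_matches_filter_alt
  set f := PySem.Dict.ofList filter
  set it := PySem.Dict.ofList item
  rw [PySem.Dict.items_eq_map_keys f (PySem.Dict.nodup_keys_ofList filter) []]
  rw [List.all_map]
  rfl

theorem item_matches_filter_spec : Claim_unchanged_item_matches_filter := by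
  intro item filter _ hnd
  unfold D_item_matches_filter at hnd
  rw [portA_char, portB_char]
  rw [← List.all_reverse]
  cases hr : (PySem.Dict.ofList filter).keys.reverse with
  | nil => rfl
  | cons k rest =>
    simp only [hr] at hnd
    set m := pvKeyOK (PySem.Dict.ofList item) (PySem.Dict.ofList filter)
    simp only [List.all_cons]
    cases hk : m k with
    | false => simp
    | true =>
      simp only [hk, Bool.true_and] at hnd ⊢
      have : rest.all m = true := by
        rw [List.all_eq_true]
        intro x hx
        by_contra hxm
        apply hnd
        rw [List.any_eq_true]
        refine ⟨x, hx, ?_⟩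
        simp only [Bool.not_eq_true] at hxm
        simp [hxm]
      simp [this]

theorem item_matches_filter_changed : Claim_changed_item_matches_filter := by
  unfold Claim_changed_item_matches_filter; decide

theorem item_matches_filter_tight : Claim_exact_item_matches_filter := by
  intro item filter _ hd
  unfold D_item_matches_filter at hd
  rw [portA_char, portB_char]
  rw [← List.all_reverse]
  cases hr : (PySem.Dict.ofList filter).keys.reverse with
  | nil => simp [hr] at hd
  | cons k rest =>
    simp only [hr] at hd
    set m := pvKeyOK (PySem.Dict.ofList item) (PySem.Dict.ofList filter)
    simp only [Bool.and_eq_true, List.any_eq_true] at hd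
    obtain ⟨hk, x, hx, hxm⟩ := hd
    simp only [List.all_cons, hk, Bool.true_and]
    intro h
    have := List.all_eq_true.mp h.symm x hx
    simp at hxm
    rw [hxm] at this
    exact absurd this (by simp)
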